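-- pv_equiv track=rewrite | github.com/thainguyen282/nvib_selfattention_thai | data_modules/DataCollatorForSeq2SeqWithNoise.py | group_from_indecies
-- ===== SOURCE A (Python) =====
-- def group_from_indecies(lst, indecies):
--     "Group a list based on the indecies"
--     size = len(lst)
--     if len(indecies) != 0:
--         groups = [
--             lst[i:j]
--             for i, j in zip(
--                 [0] + indecies,
--                 indecies + ([size] if indecies[-1] != size else []),
--             )
--         ]
--     else:
--         groups = [lst]
--     return groups
-- ===== SOURCE B (Python) =====
-- def group_from_indecies(lst, indecies):
--     "Group a list based on the indecies"
--     if not indecies: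
--         return [lst]
--     rev = []
--     if indecies[-1] != len(lst):
--         rev.append(lst[indecies[-1]:])
--     stack = list(indecies)
--     while len(stack) >= 2:
--         hi = stack.pop()
--         rev.append(lst[stack[-1]:hi])
--     rev.append(lst[:stack[0]])
--     rev.reverse()
--     return rev
-- ===== Notes on version B (the rewrite author's own statement) =====
-- stated objective: alternative
-- what changed: Instead of zipping two constructed boundary lists into slices left-to-right, B consumes the boundaries right-to-left with an explicit stack (pop the high bound, slice from the new top), building the groups back-to-front and reversing once at the end.
import Mathlib
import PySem

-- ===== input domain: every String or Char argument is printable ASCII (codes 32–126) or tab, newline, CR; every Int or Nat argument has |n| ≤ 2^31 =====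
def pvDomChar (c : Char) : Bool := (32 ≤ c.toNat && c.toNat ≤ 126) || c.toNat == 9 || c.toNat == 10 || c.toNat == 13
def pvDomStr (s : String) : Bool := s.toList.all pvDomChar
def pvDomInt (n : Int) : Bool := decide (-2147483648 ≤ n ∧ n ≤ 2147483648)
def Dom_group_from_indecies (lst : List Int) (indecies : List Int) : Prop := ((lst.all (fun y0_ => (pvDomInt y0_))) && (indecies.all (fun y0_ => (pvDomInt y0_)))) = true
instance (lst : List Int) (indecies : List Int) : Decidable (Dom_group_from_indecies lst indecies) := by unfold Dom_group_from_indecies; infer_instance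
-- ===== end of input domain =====

-- B replaces A's left-to-right zip-of-boundary-lists comprehension by a stack consumed
-- right-to-left, building the groups back-to-front and reversing once (objective: alternative; same cost).

-- ===== PORT A =====
-- literal port of A: zip ([0]+indecies) with (indecies + ([size] if indecies[-1] != size else []))
def group_from_indecies (lst : List Int) (indecies : List Int) : List (List Int) :=
  let size : Int := lst.length
  if indecies.length ≠ 0 then
    (List.zip ((0 : Int) :: indecies)
        (indecies ++ (if PySem.List.pyGet? indecies (-1) ≠ some size then [size] else []))).map
      (fun ij => PySem.List.slice lst (some ij.1) (some ij.2))
  else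
    [lst]

-- ===== PORT B =====
-- the while loop of Source B: state (rev, stack); while len(stack) >= 2: hi = stack.pop(); rev.append(lst[stack[-1]:hi])
-- (stack.pop() = getLastD/dropLast: exact here since the guard makes stack nonempty)
def pvLoopB (lst : List Int) (rev : List (List Int)) (stack : List Int) : List (List Int) × List Int :=
  if h : 2 ≤ stack.length then
    let hi := stack.getLastD 0
    let stack' := stack.dropLast
    pvLoopB lst (rev ++ [PySem.List.slice lst (some (stack'.getLastD 0)) (some hi)]) stack'
  else (rev, stack)
termination_by stack.length
decreasing_by simp [List.length_dropLast]; omega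

-- literal port of B (Source B): optional tail group first, stack loop right-to-left, head group, then reverse
-- (indecies[-1] / stack[0] are getLastD 0 / headD 0: exact, the code reaches them only on nonempty lists)
def group_from_indecies_alt (lst : List Int) (indecies : List Int) : List (List Int) :=
  if indecies = [] then [lst]
  else
    let rev0 : List (List Int) :=
      if indecies.getLastD 0 ≠ (lst.length : Int)
      then [PySem.List.slice lst (some (indecies.getLastD 0)) none] else []
    let s := pvLoopB lst rev0 indecies
    (s.1 ++ [PySem.List.slice lst none (some (s.2.headD 0))]).reverse

-- ===== PRECONDITION & SPEC =====
def Spec_group_from_indecies (lst : List Int) (indecies : List Int) (out : List (List Int)) : Prop := out = group_from_indecies_alt lst indecies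
instance (lst : List Int) (indecies : List Int) (out : List (List Int)) : Decidable (Spec_group_from_indecies lst indecies out) := by unfold Spec_group_from_indecies; infer_instance

-- ===== CLAIM (what is proved, stated in full; the proofs are below) =====
def Claim_equal_group_from_indecies : Prop := ∀ (lst : List Int) (indecies : List Int), Dom_group_from_indecies lst indecies → Spec_group_from_indecies lst indecies (group_from_indecies lst indecies)

-- ===== LEMMAS AND PROOFS =====

-- consecutive boundary pairs of a list
def pvPairs : List Int → List (Int × Int)
  | a :: b :: r => (a, b) :: pvPairs (b :: r)
  | _ => []

theorem pvPairs_dropLast : ∀ (r : List Int) (a b : Int),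
    pvPairs (a :: b :: r)
      = pvPairs ((a :: b :: r).dropLast)
        ++ [(((a :: b :: r).dropLast).getLastD 0, (a :: b :: r).getLastD 0)] := by
  intro r
  induction r with
  | nil => intro a b; simp [pvPairs]
  | cons c r' ih =>
      intro a b
      have h := ih b c
      simp only [List.dropLast_cons₂, List.getLastD_cons, pvPairs] at h ⊢
      exact congrArg (List.cons (a, b)) h

theorem pvHeadD_dropLast (stack : List Int) (h : 2 ≤ stack.length) :
    (stack.dropLast).headD 0 = stack.headD 0 := by
  cases stack with
  | nil => simp at h
  | cons a t =>
      cases t with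
      | nil => simp at h
      | cons b t' => simp [List.dropLast_cons₂]

theorem pvLoopB_spec (lst : List Int) (rev : List (List Int)) (stack : List Int) :
    stack ≠ [] →
    pvLoopB lst rev stack
      = (rev ++ ((pvPairs stack).map
            (fun p => PySem.List.slice lst (some p.1) (some p.2))).reverse,
         [stack.headD 0]) := by
  induction rev, stack using pvLoopB.induct lst with
  | case1 rev stack h hi stack' ih =>
      intro _
      rw [pvLoopB]
      simp only [dif_pos h]
      have hne : stack' ≠ [] := by
        have h2 : stack'.length = stack.length - 1 := List.length_dropLast
        intro hnil
        rw [hnil] at h2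
        simp at h2
        omega
      rw [ih hne]
      obtain ⟨a, b, r, hs⟩ : ∃ a b r, stack = a :: b :: r := by
        cases stack with
        | nil => simp at h
        | cons a t => cases t with
          | nil => simp at h
          | cons b r => exact ⟨a, b, r, rfl⟩
      subst hs
      rw [show stack' = (a :: b :: r).dropLast from rfl,
          show hi = (a :: b :: r).getLastD 0 from rfl,
          pvHeadD_dropLast _ h]
      rw [pvPairs_dropLast r a b]
      simp
  | case2 rev stack h =>
      intro hne
      rw [pvLoopB]
      simp only [dif_neg h]
      cases stack with
      | nil => exact absurd rfl hne
      | cons a t =>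
          cases t with
          | nil => simp [pvPairs]
          | cons b t' => exfalso; exact h (by simp)

-- A's spine: groups cut by consecutive boundaries starting at prev
def pvGo (lst : List Int) (prev : Int) : List Int → List (List Int)
  | [] => []
  | i :: r => PySem.List.slice lst (some prev) (some i) :: pvGo lst i r

theorem pvZip_eq (lst : List Int) :
    ∀ (ind : List Int) (prev : Int) (t : List Int),
      (List.zip (prev :: ind) (ind ++ t)).map
          (fun ij => PySem.List.slice lst (some ij.1) (some ij.2))
        = pvGo lst prev ind ++
          (List.zip [ind.getLastD prev] t).map
            (fun ij => PySem.List.slice lst (some ij.1) (some ij.2)) := by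
  intro ind
  induction ind with
  | nil => intro prev t; simp [pvGo]
  | cons i r ih =>
      intro prev t
      simp only [List.cons_append, List.zip_cons_cons, List.map_cons, pvGo,
        List.getLastD_cons, ih]

theorem pvGo_eq_pairs (lst : List Int) :
    ∀ (r : List Int) (i : Int),
      pvGo lst i r = (pvPairs (i :: r)).map
        (fun p => PySem.List.slice lst (some p.1) (some p.2)) := by
  intro r
  induction r with
  | nil => intro i; simp [pvGo, pvPairs]
  | cons j r' ih => intro i; simp only [pvGo, pvPairs, List.map_cons, ih]

theorem pvSlice_to_len (lst : List Int) (a : Int) :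
    PySem.List.slice lst (some a) (some (lst.length : Int))
      = PySem.List.slice lst (some a) none := by
  simp [PySem.List.slice]

theorem pvGetLast_neg_one (i : Int) (r : List Int) :
    PySem.List.pyGet? (i :: r) (-1) = some ((i :: r).getLastD 0) := by
  simp [pysem, List.getLast?_eq_getElem?, List.getLastD_eq_getLast?]

-- ===== VERDICT (by name: the statement is the Claim_ definition above) =====
theorem group_from_indecies_spec : Claim_equal_group_from_indecies := by
  intro lst ind _
  unfold Spec_group_from_indecies group_from_indecies group_from_indecies_alt
  cases ind with
  | nil => simp
  | cons i r =>
      simp only [List.length_cons, ne_eq, Nat.succ_ne_zero, not_false_eq_true, if_pos,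
        reduceCtorEq, if_neg]
      rw [pvZip_eq lst (i :: r) 0]
      rw [pvLoopB_spec lst _ (i :: r) (by simp)]
      rw [pvGetLast_neg_one i r]
      simp only [pvGo, pvGo_eq_pairs lst r i, List.getLastD_cons, List.headD_cons]
      by_cases hc : r.getLast?.getD i = (lst.length : Int)
      · simp [hc]
      · simp [hc, pvSlice_to_len]
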